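-- pv_equiv track=rewrite | github.com/ppagote/python-learning | section6_44.py | cappitalize
-- ===== SOURCE A (Python) =====
-- def cappitalize(my_str):
--     out_str = ''
--     for key, value in enumerate(my_str):
--         if key == 3 or key == 0:
--             out_str += value.upper()
--         else:
--             out_str += value
--     return out_str
-- ===== SOURCE B (Python) =====
-- def cappitalize(my_str):
--     chars = list(my_str)
--     for i in (0, 3):
--         if i < len(chars):
--             chars[i] = chars[i].upper()
--     return ''.join(chars)
-- ===== Notes on version B (the rewrite author's own statement) =====
-- stated objective: simpler
-- what changed: Instead of scanning every character with a per-index test and growing a string by repeated concatenation, B converts to a char list, touches only the two fixed positions 0 and 3 (guarded by length), and joins once.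
import Mathlib
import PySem

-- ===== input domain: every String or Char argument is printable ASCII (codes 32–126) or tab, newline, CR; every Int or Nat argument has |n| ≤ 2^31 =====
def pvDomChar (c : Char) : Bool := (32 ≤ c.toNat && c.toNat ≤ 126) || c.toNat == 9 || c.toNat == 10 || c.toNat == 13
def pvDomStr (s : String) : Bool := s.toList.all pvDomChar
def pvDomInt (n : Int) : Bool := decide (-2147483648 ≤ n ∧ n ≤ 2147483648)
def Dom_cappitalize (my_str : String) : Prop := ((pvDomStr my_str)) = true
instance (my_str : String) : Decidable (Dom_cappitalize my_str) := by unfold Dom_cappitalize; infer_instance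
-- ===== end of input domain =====

-- B uppercases only the two fixed positions 0 and 3 in a char list instead of scanning every character.

-- ===== PORT A =====
def cappitalize (my_str : String) : String :=
  String.ofList ((PySem.List.enumerate my_str.toList).foldl
    (fun out kv => out ++ [if kv.1 == 3 || kv.1 == 0 then PySem.Chars.upperChar kv.2 else kv.2]) [])

-- ===== PORT B =====
def cappitalize_alt (my_str : String) : String :=
  String.ofList (([0, 3] : List Nat).foldl
    (fun cs i => if h : i < cs.length then cs.set i (PySem.Chars.upperChar cs[i]) else cs)
    my_str.toList)

-- ===== PRECONDITION & SPEC =====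
def Spec_cappitalize (my_str : String) (out : String) : Prop := out = cappitalize_alt my_str
instance (my_str : String) (out : String) : Decidable (Spec_cappitalize my_str out) := by unfold Spec_cappitalize; infer_instance

-- ===== CLAIM (what is proved, stated in full; the proofs are below) =====
def Claim_equal_cappitalize : Prop := ∀ (my_str : String), Dom_cappitalize my_str → Spec_cappitalize my_str (cappitalize my_str)

-- ===== LEMMAS AND PROOFS =====

theorem map_enum_ge_four (l : List Char) (s : Int) (hs : 4 ≤ s) :
    (PySem.List.enumerate l s).map
      (fun kv : Int × Char => if kv.1 = 3 ∨ kv.1 = 0 then PySem.Chars.upperChar kv.2 else kv.2) = l := by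
  induction l generalizing s with
  | nil => simp [PySem.List.enumerate_nil]
  | cons a t ih =>
    rw [PySem.List.enumerate_cons, List.map_cons, if_neg (by omega), ih (s + 1) (by omega)]

theorem cappitalize_spec : Claim_equal_cappitalize := by
  intro my_str _
  unfold Spec_cappitalize cappitalize cappitalize_alt
  rw [PySem.List.foldl_append_singleton_eq_map]
  match h : my_str.toList with
  | [] => simp [PySem.List.enumerate_nil]
  | [a] => simp [PySem.List.enumerate_cons, PySem.List.enumerate_nil]
  | [a, b] => simp [PySem.List.enumerate_cons, PySem.List.enumerate_nil]
  | [a, b, c] => simp [PySem.List.enumerate_cons, PySem.List.enumerate_nil]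
  | a :: b :: c :: d :: rest =>
    simp [PySem.List.enumerate_cons, List.set]
    rw [map_enum_ge_four rest 4 (by omega)]
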